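-- pv_equiv track=rewrite | github.com/olapequena/pic_sort | test.py | sort_groups
-- ===== SOURCE A (Python) =====
-- def sort_groups(group) -> dict[str,list[dict]]:
--     # 用来根据每组图片的数量来拆分组别，生成新的小组
--     if not group or "rank" not in group[0] or group[0]["rank"] is None:  # 防御工程🛡️
--         return {} #数据结构出现问题，程序需要终止
--     n=len(group)
--     a=b=0
--     for i in range(n//3,-1,-1):
--         if (n-3*i)%2==0:
--             a=i
--             b=(n-3*i)//2
--             break
--     groups={}
--     rank=group[0]["rank"]  #默认同组内每张图片的"rank"属性相同，因此只用取首张图片的"rank"属性即可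
--     for f in range(a):
--         groups[f"group_{rank}_{f+1}"]=group[f*3:(f+1)*3]
--     for j in range(b):
--         start=a*3+j*2
--         groups[f"group_{rank}_{a+j+1}"]=group[start:start+2]
--     return groups #结构大致为{"group_1_1":[],"group_1_2":[],...,"group_1_a":[],"group_2_b":[],...,"group_c_d":[]}
-- ===== SOURCE B (Python) =====
-- def sort_groups(group) -> dict[str, list[dict]]:
--     # Greedy one-pass consumption: peel a chunk of 3 off the front whenever the
--     # remainder stays splittable (r >= 3 and r != 4), otherwise a chunk of 2.
--     if not group or "rank" not in group[0] or group[0]["rank"] is None: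
--         return {}
--     rank = group[0]["rank"]
--     groups = {}
--     rest = group
--     f = 1
--     while rest:
--         r = len(rest)
--         if r >= 3 and r != 4:
--             size = 3
--         elif r >= 2:
--             size = 2
--         else:
--             break  # a single leftover item is dropped, as in A
--         groups[f"group_{rank}_{f}"] = rest[:size]
--         rest = rest[size:]
--         f += 1
--     return groups
-- ===== Notes on version B (the rewrite author's own statement) =====
-- stated objective: alternative
-- what changed: Replaces A's precomputed split (countdown search for the number of 3-chunks, then two separate index-arithmetic loops slicing by computed offsets) with a single greedy pass that consumes the list from the front, deciding per step from the remaining length whether to peel a 3-chunk or a 2-chunk.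
import Mathlib
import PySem

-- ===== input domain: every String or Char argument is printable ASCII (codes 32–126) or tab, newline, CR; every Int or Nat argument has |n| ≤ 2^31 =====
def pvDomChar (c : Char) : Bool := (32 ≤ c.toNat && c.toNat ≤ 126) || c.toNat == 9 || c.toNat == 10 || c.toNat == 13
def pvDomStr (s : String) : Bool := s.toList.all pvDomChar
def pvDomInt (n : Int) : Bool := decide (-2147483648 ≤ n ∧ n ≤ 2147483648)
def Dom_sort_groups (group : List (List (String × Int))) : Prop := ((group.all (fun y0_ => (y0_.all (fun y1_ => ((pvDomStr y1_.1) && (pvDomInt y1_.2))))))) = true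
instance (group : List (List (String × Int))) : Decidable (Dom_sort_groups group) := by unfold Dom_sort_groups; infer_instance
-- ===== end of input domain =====

-- B replaces A's precomputed split (countdown search for the 3-chunk count plus two
-- offset-arithmetic slicing loops) with one greedy pass consuming the list from the
-- front, choosing a 3- or 2-chunk from the remaining length (objective: alternative).

-- ===== PORT A =====
-- A's countdown loop 'for i in range(n//3,-1,-1): if (n-3*i)%2==0: a=i; b=...; break'
def pvFindAB (n : Int) : List Int → Int × Int
  | [] => (0, 0)
  | i :: rest =>
    if PySem.Int.mod (n - 3 * i) 2 = 0 then (i, PySem.Int.floordiv (n - 3 * i) 2)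
    else pvFindAB n rest

def sort_groups (group : List (List (String × Int))) : List (String × List (List (String × Int))) :=
  match group with
  | [] => []
  | g0 :: _ =>
    match (PySem.Dict.mk g0).get? "rank" with
    | none => []   -- '"rank" not in group[0]'; 'group[0]["rank"] is None' is impossible for int values
    | some rank =>
      let n : Int := PySem.List.len group
      let ab := pvFindAB n (PySem.List.pyRange (PySem.Int.floordiv n 3) (-1) (-1))
      let a := ab.1
      let b := ab.2
      let groups1 := (PySem.List.pyRange 0 a 1).foldl (fun d f =>
        d.insert ("group_" ++ PySem.Int.toStr rank ++ "_" ++ PySem.Int.toStr (f + 1))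
          (PySem.List.slice group (some (f * 3)) (some ((f + 1) * 3))))
        (PySem.Dict.empty : PySem.Dict String (List (List (String × Int))))
      let groups2 := (PySem.List.pyRange 0 b 1).foldl (fun d j =>
        d.insert ("group_" ++ PySem.Int.toStr rank ++ "_" ++ PySem.Int.toStr (a + j + 1))
          (PySem.List.slice group (some (a * 3 + j * 2)) (some (a * 3 + j * 2 + 2)))) groups1
      groups2.items

-- ===== PORT B =====
-- B's 'while rest:' loop; rest[:k] / rest[k:] for the literal nonnegative k are
-- exactly List.take k / List.drop k (Python slice with in-range nonnegative bounds).
def pvGreedy (rank : Int) (f : Int) (d : PySem.Dict String (List (List (String × Int))))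
    (rest : List (List (String × Int))) : PySem.Dict String (List (List (String × Int))) :=
  match rest with
  | [] => d
  | x :: xs =>
    let r : Int := PySem.List.len (x :: xs)
    if 3 ≤ r ∧ r ≠ 4 then
      pvGreedy rank (f + 1)
        (d.insert ("group_" ++ PySem.Int.toStr rank ++ "_" ++ PySem.Int.toStr f) ((x :: xs).take 3))
        ((x :: xs).drop 3)
    else if 2 ≤ r then
      pvGreedy rank (f + 1)
        (d.insert ("group_" ++ PySem.Int.toStr rank ++ "_" ++ PySem.Int.toStr f) ((x :: xs).take 2))
        ((x :: xs).drop 2)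
    else d
termination_by rest.length
decreasing_by
  all_goals simp only [List.length_drop, List.length_cons]
  all_goals omega

def sort_groups_alt (group : List (List (String × Int))) : List (String × List (List (String × Int))) :=
  match group with
  | [] => []
  | g0 :: _ =>
    match (PySem.Dict.mk g0).get? "rank" with
    | none => []
    | some rank =>
      (pvGreedy rank 1 (PySem.Dict.empty : PySem.Dict String (List (List (String × Int)))) group).items

-- ===== PRECONDITION & SPEC =====
def Spec_sort_groups (group : List (List (String × Int))) (out : List (String × List (List (String × Int)))) : Prop := out = sort_groups_alt group
instance (group : List (List (String × Int))) (out : List (String × List (List (String × Int)))) : Decidable (Spec_sort_groups group out) := by unfold Spec_sort_groups; infer_instance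

-- ===== CLAIM (what is proved, stated in full; the proofs are below) =====
def Claim_equal_sort_groups : Prop := ∀ (group : List (List (String × Int))), Dom_sort_groups group → Spec_sort_groups group (sort_groups group)

-- ===== LEMMAS AND PROOFS =====

def pvKey (rank k : Int) : String := "group_" ++ PySem.Int.toStr rank ++ "_" ++ PySem.Int.toStr k

-- the pair list A's two loops insert, indexed by slices of the full list
def pvPairsB (rank : Int) (group : List (List (String × Int))) :
    List Int → Int → Int → List (String × List (List (String × Int)))
  | [], _, _ => []
  | sz :: rest, s, idx =>
    (pvKey rank (s + 1), PySem.List.slice group (some idx) (some (idx + sz)))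
      :: pvPairsB rank group rest (s + 1) (idx + sz)

-- the pair list B's greedy loop inserts, indexed by take/drop of the remainder
def pvPairs2 (rank : Int) : List Nat → Int → List (List (String × Int)) →
    List (String × List (List (String × Int)))
  | [], _, _ => []
  | sz :: rest, f, l => (pvKey rank f, l.take sz) :: pvPairs2 rank rest (f + 1) (l.drop sz)

-- greedy size sequence on the remaining length
def gSizes (n : Nat) : List Nat :=
  if 3 ≤ n ∧ n ≠ 4 then 3 :: gSizes (n - 3)
  else if 2 ≤ n then 2 :: gSizes (n - 2)
  else []
termination_by n
decreasing_by all_goals omega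

-- closed-form chunk counts (Nat versions of A's a and b)
def aN (n : Nat) : Nat := if (n / 3) % 2 = n % 2 then n / 3 else n / 3 - 1
def bN (n : Nat) : Nat := (n - 3 * aN n) / 2

lemma pvPairsB_replicate (rank : Int) (group : List (List (String × Int))) (c : Int) :
    ∀ (k : Nat) (t : List Int) (s idx : Int),
    pvPairsB rank group (List.replicate k c ++ t) s idx
    = (List.range k).map (fun (j : Nat) => (pvKey rank (s + (j : Int) + 1),
        PySem.List.slice group (some (idx + c * (j : Int))) (some (idx + c * (j : Int) + c))))
      ++ pvPairsB rank group t (s + k) (idx + c * k)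
  | 0, t, s, idx => by simp
  | (k + 1), t, s, idx => by
    rw [List.replicate_succ, List.cons_append]
    simp only [pvPairsB]
    rw [pvPairsB_replicate rank group c k t (s + 1) (idx + c)]
    rw [List.range_succ_eq_map]
    simp only [List.map_cons, List.map_map, List.cons_append]
    push_cast
    ring_nf
    simp only [Function.comp_def, Nat.succ_eq_add_one]
    push_cast
    ring_nf

lemma pvAB_eq (n : Int) (hn : 1 ≤ n) :
    pvFindAB n (PySem.List.pyRange (PySem.Int.floordiv n 3) (-1) (-1))
    = (max (if PySem.Int.mod (PySem.Int.floordiv n 3) 2 ≠ PySem.Int.mod n 2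
              then PySem.Int.floordiv n 3 - 1 else PySem.Int.floordiv n 3) 0,
       PySem.Int.floordiv
         (n - 3 * max (if PySem.Int.mod (PySem.Int.floordiv n 3) 2 ≠ PySem.Int.mod n 2
              then PySem.Int.floordiv n 3 - 1 else PySem.Int.floordiv n 3) 0) 2) := by
  have e3 : PySem.Int.floordiv n 3 = n / 3 := PySem.Int.floordiv_eq_ediv_of_pos (by norm_num)
  have ec : PySem.Int.mod (n / 3) 2 = (n / 3) % 2 := PySem.Int.mod_eq_emod_of_pos (by norm_num)
  have en : PySem.Int.mod n 2 = n % 2 := PySem.Int.mod_eq_emod_of_pos (by norm_num)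
  have hc0 : 0 ≤ n / 3 := Int.ediv_nonneg (by omega) (by norm_num)
  rw [e3, ec, en]
  by_cases hp : (n / 3) % 2 = n % 2
  · have heven : PySem.Int.mod (n - 3 * (n / 3)) 2 = 0 := by
      rw [PySem.Int.mod_eq_emod_of_pos (by norm_num)]; omega
    rw [if_neg (by simp [hp]), max_eq_left hc0,
        PySem.List.pyRange_neg_one_cons (by omega : (-1 : Int) < n / 3)]
    simp only [pvFindAB]
    rw [if_pos heven]
  · have hodd : ¬ PySem.Int.mod (n - 3 * (n / 3)) 2 = 0 := by
      rw [PySem.Int.mod_eq_emod_of_pos (by norm_num)]; omega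
    rw [if_pos (by simp [hp])]
    by_cases h0 : n / 3 = 0
    · have hn1 : n = 1 := by omega
      subst hn1
      norm_num at h0 ⊢
      decide
    · have hev2 : PySem.Int.mod (n - 3 * (n / 3 - 1)) 2 = 0 := by
        rw [PySem.Int.mod_eq_emod_of_pos (by norm_num)]; omega
      rw [PySem.List.pyRange_neg_one_cons (by omega : (-1 : Int) < n / 3),
          PySem.List.pyRange_neg_one_cons (by omega : (-1 : Int) < n / 3 - 1),
          max_eq_left (by omega : (0 : Int) ≤ n / 3 - 1)]
      simp only [pvFindAB]
      rw [if_neg hodd, if_pos hev2]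

def pvIns (d : PySem.Dict String (List (List (String × Int))))
    (ps : List (String × List (List (String × Int)))) : PySem.Dict String (List (List (String × Int))) :=
  ps.foldl (fun d p => d.insert p.1 p.2) d

lemma pvIns_append (d : PySem.Dict String (List (List (String × Int)))) (l1 l2 : List (String × List (List (String × Int)))) :
    pvIns d (l1 ++ l2) = pvIns (pvIns d l1) l2 := by
  simp [pvIns, List.foldl_append]

lemma pvA_fold1 (rank : Int) (group : List (List (String × Int))) :
    ∀ (l : List Int) (d : PySem.Dict String (List (List (String × Int)))),
    l.foldl (fun d f =>
        d.insert ("group_" ++ PySem.Int.toStr rank ++ "_" ++ PySem.Int.toStr (f + 1))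
          (PySem.List.slice group (some (f * 3)) (some ((f + 1) * 3)))) d
    = pvIns d (l.map (fun f => (pvKey rank (f + 1),
        PySem.List.slice group (some (f * 3)) (some ((f + 1) * 3)))))
  | [], d => by simp [pvIns]
  | f :: l, d => by
    simp only [List.foldl_cons, List.map_cons, pvIns, pvKey]
    exact pvA_fold1 rank group l _

lemma pvA_fold2 (rank : Int) (group : List (List (String × Int))) (a : Int) :
    ∀ (l : List Int) (d : PySem.Dict String (List (List (String × Int)))),
    l.foldl (fun d j =>
        d.insert ("group_" ++ PySem.Int.toStr rank ++ "_" ++ PySem.Int.toStr (a + j + 1))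
          (PySem.List.slice group (some (a * 3 + j * 2)) (some (a * 3 + j * 2 + 2)))) d
    = pvIns d (l.map (fun j => (pvKey rank (a + j + 1),
        PySem.List.slice group (some (a * 3 + j * 2)) (some (a * 3 + j * 2 + 2)))))
  | [], d => by simp [pvIns]
  | j :: l, d => by
    simp only [List.foldl_cons, List.map_cons, pvIns, pvKey]
    exact pvA_fold2 rank group a l _

lemma pvPairsB_replicate_nil (rank : Int) (group : List (List (String × Int))) (c : Int)
    (k : Nat) (s idx : Int) :
    pvPairsB rank group (List.replicate k c) s idx
    = (List.range k).map (fun (j : Nat) => (pvKey rank (s + (j : Int) + 1),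
        PySem.List.slice group (some (idx + c * (j : Int))) (some (idx + c * (j : Int) + c)))) := by
  have h := pvPairsB_replicate rank group c k [] s idx
  simpa [pvPairsB] using h

lemma pvLists (rank : Int) (group : List (List (String × Int))) (A B : Int) (hA : 0 ≤ A) :
    ((PySem.List.pyRange 0 A 1).map (fun f => (pvKey rank (f + 1),
        PySem.List.slice group (some (f * 3)) (some ((f + 1) * 3)))))
    ++ ((PySem.List.pyRange 0 B 1).map (fun j => (pvKey rank (A + j + 1),
        PySem.List.slice group (some (A * 3 + j * 2)) (some (A * 3 + j * 2 + 2)))))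
    = pvPairsB rank group (List.replicate A.toNat 3 ++ List.replicate B.toNat 2) 0 0 := by
  rw [pvPairsB_replicate, pvPairsB_replicate_nil]
  have hcast : ((A.toNat : Int)) = A := Int.toNat_of_nonneg hA
  simp only [sub_zero, PySem.List.pyRange_one, List.map_map, hcast]
  congr 1
  · apply List.map_congr_left
    intro k _
    simp only [Function.comp_apply]
    try ring_nf
  · apply List.map_congr_left
    intro k _
    simp only [Function.comp_apply]
    try ring_nf

-- bridge: slices of the full list by running offsets = take/drop of the remainder
lemma pvPairsB_eq_pairs2 (rank : Int) (group : List (List (String × Int))) :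
    ∀ (sizes : List Nat) (s idx : Nat),
    pvPairsB rank group (sizes.map Int.ofNat) (s : Int) (idx : Int)
    = pvPairs2 rank sizes ((s : Int) + 1) (group.drop idx)
  | [], s, idx => by simp [pvPairsB, pvPairs2]
  | sz :: rest, s, idx => by
    simp only [List.map_cons, pvPairsB, pvPairs2]
    have hsz : (Int.ofNat sz) = ((sz : Nat) : Int) := rfl
    rw [hsz, PySem.List.slice_natCast_add]
    have h := pvPairsB_eq_pairs2 rank group rest (s + 1) (idx + sz)
    push_cast at h
    congr 1
    rw [List.drop_drop]
    exact h

lemma pvGreedy_eq (rank : Int) :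
    ∀ (n : Nat) (l : List (List (String × Int))), l.length = n →
    ∀ (f : Int) (d : PySem.Dict String (List (List (String × Int)))),
    pvGreedy rank f d l = pvIns d (pvPairs2 rank (gSizes l.length) f l) := by
  intro n
  induction n using Nat.strong_induction_on with
  | _ n ih =>
    intro l hl f d
    match l with
    | [] => simp [pvGreedy, gSizes, pvPairs2, pvIns]
    | x :: xs =>
      rw [pvGreedy]
      have hlen : PySem.List.len (x :: xs) = ((x :: xs).length : Int) := rfl
      rw [gSizes]
      by_cases h3 : 3 ≤ (x :: xs).length ∧ (x :: xs).length ≠ 4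
      · have h3' : 3 ≤ PySem.List.len (x :: xs) ∧ PySem.List.len (x :: xs) ≠ 4 := by
          rw [hlen]; constructor
          · exact_mod_cast h3.1
          · intro hc; exact h3.2 (by exact_mod_cast hc)
        rw [if_pos h3', if_pos h3]
        simp only [pvPairs2, pvIns, List.foldl_cons]
        rw [ih ((x :: xs).drop 3).length (by subst hl; simp only [List.length_drop, List.length_cons]; omega) _ rfl]
        simp only [List.length_drop, pvKey, pvIns]
      · have h3' : ¬ (3 ≤ PySem.List.len (x :: xs) ∧ PySem.List.len (x :: xs) ≠ 4) := by
          rw [hlen]; intro hc; apply h3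
          constructor
          · exact_mod_cast hc.1
          · intro he; exact hc.2 (by exact_mod_cast he)
        rw [if_neg h3', if_neg h3]
        by_cases h2 : 2 ≤ (x :: xs).length
        · have h2' : 2 ≤ PySem.List.len (x :: xs) := by rw [hlen]; exact_mod_cast h2
          rw [if_pos h2', if_pos h2]
          simp only [pvPairs2, pvIns, List.foldl_cons]
          rw [ih ((x :: xs).drop 2).length (by subst hl; simp only [List.length_drop, List.length_cons]; omega) _ rfl]
          simp only [List.length_drop, pvKey, pvIns]
        · have h2' : ¬ 2 ≤ PySem.List.len (x :: xs) := by
            rw [hlen]; intro hc; exact h2 (by exact_mod_cast hc)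
          rw [if_neg h2', if_neg h2]
          simp only [pvPairs2, pvIns, List.foldl_nil]

lemma aN_step (n : Nat) (h : 3 ≤ n) (h4 : n ≠ 4) : aN n = aN (n - 3) + 1 := by
  simp only [aN]; split_ifs <;> omega

lemma aN_le (m : Nat) : aN m ≤ m / 3 := by
  simp only [aN]; split_ifs <;> omega

lemma bN_step (n : Nat) (h : 3 ≤ n) (h4 : n ≠ 4) : bN n = bN (n - 3) := by
  rw [bN, bN, aN_step n h h4]
  have := aN_le (n - 3)
  omega

lemma gSizes_eq (n : Nat) : gSizes n = List.replicate (aN n) 3 ++ List.replicate (bN n) 2 := by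
  induction n using Nat.strong_induction_on with
  | _ n ih =>
    rw [gSizes]
    by_cases h3 : 3 ≤ n ∧ n ≠ 4
    · rw [if_pos h3, ih (n - 3) (by omega), aN_step n h3.1 h3.2, bN_step n h3.1 h3.2,
          List.replicate_succ, List.cons_append]
    · rw [if_neg h3]
      by_cases h2 : 2 ≤ n
      · rw [if_pos h2]
        have hn : n = 2 ∨ n = 4 := by omega
        rcases hn with h | h <;> subst h <;> rw [ih _ (by omega)] <;> decide
      · rw [if_neg h2]
        have hn : n = 0 ∨ n = 1 := by omega
        rcases hn with h | h <;> subst h <;> decide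

-- A's Int closed-form counts agree with aN / bN
lemma pvCountsA (m : Nat) :
    (max (if PySem.Int.mod (PySem.Int.floordiv (m : Int) 3) 2 ≠ PySem.Int.mod (m : Int) 2
            then PySem.Int.floordiv (m : Int) 3 - 1 else PySem.Int.floordiv (m : Int) 3) 0).toNat = aN m := by
  rw [show PySem.Int.floordiv ((m : Int)) 3 = (m : Int) / 3 from PySem.Int.floordiv_eq_ediv_of_pos (by norm_num),
      show PySem.Int.mod ((m : Int) / 3) 2 = ((m : Int) / 3) % 2 from PySem.Int.mod_eq_emod_of_pos (by norm_num),
      show PySem.Int.mod ((m : Int)) 2 = (m : Int) % 2 from PySem.Int.mod_eq_emod_of_pos (by norm_num)]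
  simp only [aN]
  have h1 : ((m : Int) / 3) = ((m / 3 : Nat) : Int) := by push_cast; rfl
  split_ifs with hi hj hj <;> rw [h1] at hi <;> omega

lemma pvCountsB (m : Nat) :
    (PySem.Int.floordiv ((m : Int) - 3 * max (if PySem.Int.mod (PySem.Int.floordiv (m : Int) 3) 2 ≠ PySem.Int.mod (m : Int) 2
            then PySem.Int.floordiv (m : Int) 3 - 1 else PySem.Int.floordiv (m : Int) 3) 0) 2).toNat = bN m := by
  rw [show PySem.Int.floordiv ((m : Int)) 3 = (m : Int) / 3 from PySem.Int.floordiv_eq_ediv_of_pos (by norm_num),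
      show PySem.Int.mod ((m : Int) / 3) 2 = ((m : Int) / 3) % 2 from PySem.Int.mod_eq_emod_of_pos (by norm_num),
      show PySem.Int.mod ((m : Int)) 2 = (m : Int) % 2 from PySem.Int.mod_eq_emod_of_pos (by norm_num),
      PySem.Int.floordiv_eq_ediv_of_pos (by norm_num : (0:Int) < 2)]
  simp only [bN, aN]
  split_ifs with hi hj hj <;> omega

lemma sort_groups_eq_alt_cons (g0 : List (String × Int)) (rest : List (List (String × Int)))
    (rank : Int) (hget : (PySem.Dict.mk g0).get? "rank" = some rank) :
    sort_groups (g0 :: rest) = sort_groups_alt (g0 :: rest) := by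
  simp only [sort_groups, sort_groups_alt, hget]
  have hn1 : (1 : Int) ≤ PySem.List.len (g0 :: rest) := by simp
  rw [pvAB_eq _ hn1]
  dsimp only
  congr 1
  rw [pvA_fold1, pvA_fold2, ← pvIns_append, pvLists _ _ _ _ (le_max_right _ _)]
  rw [pvGreedy_eq rank (g0 :: rest).length (g0 :: rest) rfl]
  congr 1
  have hl : PySem.List.len (g0 :: rest) = (((g0 :: rest).length : Nat) : Int) := rfl
  rw [hl, pvCountsA, pvCountsB, gSizes_eq]
  have hmap : (List.replicate (aN (g0 :: rest).length) (3 : Int) ++ List.replicate (bN (g0 :: rest).length) (2 : Int))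
      = ((List.replicate (aN (g0 :: rest).length) (3 : Nat) ++ List.replicate (bN (g0 :: rest).length) (2 : Nat)).map Int.ofNat) := by
    simp
  rw [hmap]
  have h := pvPairsB_eq_pairs2 rank (g0 :: rest)
    (List.replicate (aN (g0 :: rest).length) 3 ++ List.replicate (bN (g0 :: rest).length) 2) 0 0
  simpa using h

-- ===== VERDICT (by name: the statement is the Claim_ definition above) =====
theorem sort_groups_spec : Claim_equal_sort_groups := by
  intro group _
  show sort_groups group = sort_groups_alt group
  cases group with
  | nil => rfl
  | cons g0 rest =>
    cases hget : (PySem.Dict.mk g0).get? "rank" with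
    | none => simp [sort_groups, sort_groups_alt, hget]
    | some rank => exact sort_groups_eq_alt_cons g0 rest rank hget
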